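-- pv_equiv track=rewrite | github.com/JohnSnowLabs/nlu | nlu/pipe/extractors/extractor_methods/helper_extractor_methods.py | unpack_HPO_codes
-- ===== SOURCE A (Python) =====
-- def unpack_HPO_codes(row, k):
--     # Case: HPO
--     UMLS_codes = []
--     ORPHA_CODES = []
--     MSH_CODES = []
--     SNOMED_CODES = []
--     OMIM_CODES = []
--
--     for resolution in row[k]:
--         k_candidates = resolution.split(':::')
--         for candidate in k_candidates:
--             # There is 0 to 5 alt terminologies, 1 per HPO_codes. If one is missing, we have to append None
--             alt_terminologies = candidate.split('||')
--             UMLS_ok, ORPHA_ok, MSH_ok, SNOMED_ok, OMIM_ok = False, False, False, False, False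
--             for alt in alt_terminologies:
--                 if 'UMLS' in alt:
--                     UMLS_codes.append(alt)
--                     UMLS_ok = True
--                 elif 'ORPHA' in alt:
--                     ORPHA_CODES.append(alt)
--                     ORPHA_ok = True
--                 elif 'MSH' in alt:
--                     MSH_CODES.append(alt)
--                     MSH_ok = True
--                 elif 'SNOMED' in alt:
--                     SNOMED_CODES.append(alt)
--                     SNOMED_ok = True
--                 elif 'OMIM' in alt:
--                     OMIM_CODES.append(alt)
--                     OMIM_ok = True
--             # Detect which of the 0 to 5 alt terminologies are missing and add None for them
--             if not UMLS_ok: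
--                 UMLS_codes.append(None)
--             if not ORPHA_ok:
--                 ORPHA_CODES.append(None)
--             if not MSH_ok:
--                 MSH_CODES.append(None)
--             if not SNOMED_ok:
--                 SNOMED_CODES.append(None)
--             if not OMIM_ok:
--                 OMIM_CODES.append(None)
--     return UMLS_codes, ORPHA_CODES, MSH_CODES, SNOMED_CODES, OMIM_CODES,
-- ===== SOURCE B (Python) =====
-- TERMS = ['UMLS', 'ORPHA', 'MSH', 'SNOMED', 'OMIM']
--
--
-- def _codes_for(resolutions, term, earlier):
--     # One independent pass collecting the codes of a single terminology.
--     out = []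
--     for resolution in resolutions:
--         for candidate in resolution.split(':::'):
--             hits = [alt for alt in candidate.split('||')
--                     if term in alt and not any(e in alt for e in earlier)]
--             out.extend(hits if hits else [None])
--     return out
--
--
-- def unpack_HPO_codes(row, k):
--     resolutions = row[k]
--     return tuple(_codes_for(resolutions, t, TERMS[:i])
--                  for i, t in enumerate(TERMS))
-- ===== Notes on version B (the rewrite author's own statement) =====
-- stated objective: alternative
-- what changed: A makes one pass threading five accumulator lists and five per-candidate boolean flags through an elif chain; B instead runs one independent filtering pass per terminology, selecting each candidate's alts whose first matching terminology name is the given one (term in alt and no higher-priority name in alt) and emitting None when a candidate has no hit.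
import Mathlib
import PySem

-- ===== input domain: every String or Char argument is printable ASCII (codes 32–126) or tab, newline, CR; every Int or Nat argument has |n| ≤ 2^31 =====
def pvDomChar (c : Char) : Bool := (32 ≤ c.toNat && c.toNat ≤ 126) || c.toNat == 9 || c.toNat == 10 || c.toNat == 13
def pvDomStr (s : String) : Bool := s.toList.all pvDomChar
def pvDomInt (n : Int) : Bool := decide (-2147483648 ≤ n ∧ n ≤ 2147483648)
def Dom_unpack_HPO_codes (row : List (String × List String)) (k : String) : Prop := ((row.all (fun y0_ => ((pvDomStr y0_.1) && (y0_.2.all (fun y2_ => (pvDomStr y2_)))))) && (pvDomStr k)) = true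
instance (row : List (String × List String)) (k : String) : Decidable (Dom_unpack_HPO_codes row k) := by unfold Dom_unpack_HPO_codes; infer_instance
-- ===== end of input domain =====

-- B replaces A's single pass with five accumulator lists and five flags by one independent
-- filtering pass per terminology (alternative decomposition, same asymptotic cost).

-- ===== PORT A =====
-- A's inner `for alt in alt_terminologies` loop body: state = (five lists, five _ok flags)
def pvAInner
    (st : ((List (Option String) × List (Option String) × List (Option String) × List (Option String) × List (Option String)) × (Bool × Bool × Bool × Bool × Bool)))
    (alt : String) :
    ((List (Option String) × List (Option String) × List (Option String) × List (Option String) × List (Option String)) × (Bool × Bool × Bool × Bool × Bool)) :=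
  match st with
  | ((u, o, m, s, om), (fu, fo, fm, fs, fom)) =>
    if PySem.Str.isIn "UMLS" alt then ((u ++ [some alt], o, m, s, om), (true, fo, fm, fs, fom))
    else if PySem.Str.isIn "ORPHA" alt then ((u, o ++ [some alt], m, s, om), (fu, true, fm, fs, fom))
    else if PySem.Str.isIn "MSH" alt then ((u, o, m ++ [some alt], s, om), (fu, fo, true, fs, fom))
    else if PySem.Str.isIn "SNOMED" alt then ((u, o, m, s ++ [some alt], om), (fu, fo, fm, true, fom))
    else if PySem.Str.isIn "OMIM" alt then ((u, o, m, s, om ++ [some alt]), (fu, fo, fm, fs, true))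
    else ((u, o, m, s, om), (fu, fo, fm, fs, fom))

-- A's `for candidate in k_candidates` loop body: run the alt loop, then append None for unset flags.
-- candidate.split('||') is (PySem.Str.split? · "||").getD [] — exact, the separator is non-empty.
def pvACand
    (L : (List (Option String) × List (Option String) × List (Option String) × List (Option String) × List (Option String)))
    (candidate : String) :
    (List (Option String) × List (Option String) × List (Option String) × List (Option String) × List (Option String)) :=
  let alt_terminologies := (PySem.Str.split? candidate "||").getD []
  match alt_terminologies.foldl pvAInner (L, (false, false, false, false, false)) with
  | ((u, o, m, s, om), (fu, fo, fm, fs, fom)) =>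
    ((if fu then u else u ++ [none]),
     (if fo then o else o ++ [none]),
     (if fm then m else m ++ [none]),
     (if fs then s else s ++ [none]),
     (if fom then om else om ++ [none]))

def unpack_HPO_codes (row : List (String × List String)) (k : String) : List (Option String) × List (Option String) × List (Option String) × List (Option String) × List (Option String) :=
  -- row[k]; Pre_ guarantees the key is present (Python raises KeyError otherwise)
  let resolutions := ((PySem.Dict.ofList row).get? k).getD []
  resolutions.foldl (fun L r => ((PySem.Str.split? r ":::").getD []).foldl pvACand L)
    (([], [], [], [], []))

-- ===== PORT B =====
-- alt belongs to terminology `term` iff `term` occurs in it and no higher-priority name does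
def pvHit (term : String) (earlier : List String) (a : String) : Bool :=
  PySem.Str.isIn term a && !(earlier.any (fun e => PySem.Str.isIn e a))

-- codes a single candidate contributes to one terminology ([None] if it has no matching alt)
def pvCandCodes (term : String) (earlier : List String) (candidate : String) : List (Option String) :=
  let hits := (((PySem.Str.split? candidate "||").getD []).filter (pvHit term earlier)).map some
  if hits.isEmpty then [none] else hits

-- one independent pass over the resolutions for one terminology (Source B's _codes_for)
def pvCodesFor (resolutions : List String) (term : String) (earlier : List String) : List (Option String) :=
  resolutions.flatMap (fun r => ((PySem.Str.split? r ":::").getD []).flatMap (pvCandCodes term earlier))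

def unpack_HPO_codes_alt (row : List (String × List String)) (k : String) : List (Option String) × List (Option String) × List (Option String) × List (Option String) × List (Option String) :=
  let resolutions := ((PySem.Dict.ofList row).get? k).getD []
  (pvCodesFor resolutions "UMLS" [],
   pvCodesFor resolutions "ORPHA" ["UMLS"],
   pvCodesFor resolutions "MSH" ["UMLS", "ORPHA"],
   pvCodesFor resolutions "SNOMED" ["UMLS", "ORPHA", "MSH"],
   pvCodesFor resolutions "OMIM" ["UMLS", "ORPHA", "MSH", "SNOMED"])

-- ===== PRECONDITION & SPEC =====
-- A evaluates row[k], which raises KeyError when k is not a key of the dict; Pre_ requires the key.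
def Pre_unpack_HPO_codes (row : List (String × List String)) (k : String) : Prop :=
  (PySem.Dict.ofList row).contains k = true
instance (row : List (String × List String)) (k : String) : Decidable (Pre_unpack_HPO_codes row k) := by unfold Pre_unpack_HPO_codes; infer_instance

def pvWitness_unpack_HPO_codes : (List (String × List String)) × String :=
  ([("res", ["UMLS:C1||OMIM:1:::x"])], "res")

def Spec_unpack_HPO_codes (row : List (String × List String)) (k : String) (out : List (Option String) × List (Option String) × List (Option String) × List (Option String) × List (Option String)) : Prop := out = unpack_HPO_codes_alt row k
instance (row : List (String × List String)) (k : String) (out : List (Option String) × List (Option String) × List (Option String) × List (Option String) × List (Option String)) : Decidable (Spec_unpack_HPO_codes row k out) := by unfold Spec_unpack_HPO_codes; infer_instance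

-- ===== CLAIM (what is proved, stated in full; the proofs are below) =====
def Claim_equal_unpack_HPO_codes : Prop := ∀ (row : List (String × List String)) (k : String), Dom_unpack_HPO_codes row k → Pre_unpack_HPO_codes row k → Spec_unpack_HPO_codes row k (unpack_HPO_codes row k)

-- ===== LEMMAS AND PROOFS =====

-- the alts of one candidate that A's elif chain credits to one terminology
def pvSel (t : String) (e : List String) (as : List String) : List (Option String) :=
  (as.filter (pvHit t e)).map some

-- one step of A's elif chain, expressed with B's first-match predicate
lemma pvAInner_eq (u o m s om : List (Option String)) (fu fo fm fs fom : Bool) (a : String) :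
    pvAInner ((u, o, m, s, om), (fu, fo, fm, fs, fom)) a =
      ((u ++ (if pvHit "UMLS" [] a then [some a] else []),
        o ++ (if pvHit "ORPHA" ["UMLS"] a then [some a] else []),
        m ++ (if pvHit "MSH" ["UMLS", "ORPHA"] a then [some a] else []),
        s ++ (if pvHit "SNOMED" ["UMLS", "ORPHA", "MSH"] a then [some a] else []),
        om ++ (if pvHit "OMIM" ["UMLS", "ORPHA", "MSH", "SNOMED"] a then [some a] else [])),
       (fu || pvHit "UMLS" [] a,
        fo || pvHit "ORPHA" ["UMLS"] a,
        fm || pvHit "MSH" ["UMLS", "ORPHA"] a,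
        fs || pvHit "SNOMED" ["UMLS", "ORPHA", "MSH"] a,
        fom || pvHit "OMIM" ["UMLS", "ORPHA", "MSH", "SNOMED"] a)) := by
  simp only [pvHit, List.any_cons, List.any_nil, Bool.or_false, Bool.not_false]
  cases hU : PySem.Str.isIn "UMLS" a <;>
    cases hO : PySem.Str.isIn "ORPHA" a <;>
      cases hM : PySem.Str.isIn "MSH" a <;>
        cases hS : PySem.Str.isIn "SNOMED" a <;>
          cases hOm : PySem.Str.isIn "OMIM" a <;>
            simp only [pvAInner, hU, hO, hM, hS, hOm, Bool.or_false, Bool.or_true,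
              Bool.not_true, Bool.not_false, Bool.and_true, Bool.and_false,
              Bool.false_eq_true, if_true, if_false, List.append_nil]

lemma pvSel_cons (t : String) (e : List String) (a : String) (as : List String) :
    pvSel t e (a :: as) = (if pvHit t e a then [some a] else []) ++ pvSel t e as := by
  simp only [pvSel, List.filter_cons]
  by_cases h : pvHit t e a = true <;> simp [h]

lemma pvNotEmpty_append (b : Bool) (x : Option String) (l : List (Option String)) :
    (!((if b = true then [x] else []) ++ l).isEmpty) = (b || !l.isEmpty) := by
  cases b <;> simp

lemma pvInner_spec (as : List String) :
    ∀ u o m s om fu fo fm fs fom,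
    as.foldl pvAInner ((u, o, m, s, om), (fu, fo, fm, fs, fom)) =
      ((u ++ pvSel "UMLS" [] as,
        o ++ pvSel "ORPHA" ["UMLS"] as,
        m ++ pvSel "MSH" ["UMLS", "ORPHA"] as,
        s ++ pvSel "SNOMED" ["UMLS", "ORPHA", "MSH"] as,
        om ++ pvSel "OMIM" ["UMLS", "ORPHA", "MSH", "SNOMED"] as),
       (fu || !(pvSel "UMLS" [] as).isEmpty,
        fo || !(pvSel "ORPHA" ["UMLS"] as).isEmpty,
        fm || !(pvSel "MSH" ["UMLS", "ORPHA"] as).isEmpty,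
        fs || !(pvSel "SNOMED" ["UMLS", "ORPHA", "MSH"] as).isEmpty,
        fom || !(pvSel "OMIM" ["UMLS", "ORPHA", "MSH", "SNOMED"] as).isEmpty)) := by
  induction as with
  | nil => intro u o m s om fu fo fm fs fom; simp [pvSel]
  | cons a as ih =>
    intro u o m s om fu fo fm fs fom
    simp only [List.foldl_cons, pvAInner_eq, ih, pvSel_cons, pvNotEmpty_append,
      List.append_assoc, Bool.or_assoc]

lemma pvIfNone (l sel : List (Option String)) :
    (if !sel.isEmpty then l ++ sel else (l ++ sel) ++ [none]) =
      l ++ (if sel.isEmpty then [none] else sel) := by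
  cases h : sel.isEmpty
  · simp
  · simp [List.isEmpty_iff.mp h]

lemma pvCand_spec (u o m s om : List (Option String)) (c : String) :
    pvACand (u, o, m, s, om) c =
      (u ++ pvCandCodes "UMLS" [] c,
       o ++ pvCandCodes "ORPHA" ["UMLS"] c,
       m ++ pvCandCodes "MSH" ["UMLS", "ORPHA"] c,
       s ++ pvCandCodes "SNOMED" ["UMLS", "ORPHA", "MSH"] c,
       om ++ pvCandCodes "OMIM" ["UMLS", "ORPHA", "MSH", "SNOMED"] c) := by
  have hCC : ∀ t e, pvCandCodes t e c =
      (if (pvSel t e ((PySem.Str.split? c "||").getD [])).isEmpty then [none]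
       else pvSel t e ((PySem.Str.split? c "||").getD [])) := fun t e => rfl
  simp only [pvACand, pvInner_spec, Bool.false_or, pvIfNone, hCC]

lemma pvCandFold_spec (cs : List String) :
    ∀ u o m s om : List (Option String),
    cs.foldl pvACand (u, o, m, s, om) =
      (u ++ cs.flatMap (pvCandCodes "UMLS" []),
       o ++ cs.flatMap (pvCandCodes "ORPHA" ["UMLS"]),
       m ++ cs.flatMap (pvCandCodes "MSH" ["UMLS", "ORPHA"]),
       s ++ cs.flatMap (pvCandCodes "SNOMED" ["UMLS", "ORPHA", "MSH"]),
       om ++ cs.flatMap (pvCandCodes "OMIM" ["UMLS", "ORPHA", "MSH", "SNOMED"])) := by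
  induction cs with
  | nil => intro u o m s om; simp
  | cons c cs ih =>
    intro u o m s om
    simp only [List.foldl_cons, pvCand_spec, ih, List.flatMap_cons, List.append_assoc]

lemma pvResFold_spec (rs : List String) :
    ∀ u o m s om : List (Option String),
    rs.foldl (fun L r => ((PySem.Str.split? r ":::").getD []).foldl pvACand L) (u, o, m, s, om) =
      (u ++ pvCodesFor rs "UMLS" [],
       o ++ pvCodesFor rs "ORPHA" ["UMLS"],
       m ++ pvCodesFor rs "MSH" ["UMLS", "ORPHA"],
       s ++ pvCodesFor rs "SNOMED" ["UMLS", "ORPHA", "MSH"],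
       om ++ pvCodesFor rs "OMIM" ["UMLS", "ORPHA", "MSH", "SNOMED"]) := by
  induction rs with
  | nil => intro u o m s om; simp [pvCodesFor]
  | cons r rs ih =>
    intro u o m s om
    simp only [List.foldl_cons, pvCandFold_spec, ih, pvCodesFor, List.flatMap_cons,
      List.append_assoc]

-- ===== VERDICT (by name: the statement is the Claim_ definition above) =====
theorem unpack_HPO_codes_spec : Claim_equal_unpack_HPO_codes := by
  intro row k _ _
  show _ = _
  simp only [unpack_HPO_codes, unpack_HPO_codes_alt, pvResFold_spec, List.nil_append]
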